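-- pv_equiv track=rewrite | github.com/Misha86/python-online-marathon | 1_sprint/1_Question.py | kthTerm
-- ===== SOURCE A (Python) =====
-- def kthTerm(n, k) -> int:
--     """
--     [3**0] = > [1]
--     [1,        3**1, 3**1 + 1] = > [1, 3, 4]
--     [1, 3, 4,  3**2, 3**2 + 1, 3**2 + 3, 3**2 + 4] = > [1, 3, 4, 9, 10, 12, 13]
--     """
--     res = []
--     for i in range(k):
--         if len(res) > k:
--             break
--         for j in range(len(res) + 1):
--             if j == 0:
--                 lis = n ** i
--             else:
--                 lis = n ** i + res[j-1]
--             res.append(lis)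
--     return res[k-1]
-- ===== SOURCE B (Python) =====
-- def kthTerm(n, k) -> int:
--     # k-th number whose base-n digits are all 0/1: write k in binary, read it in base n.
--     acc = 0
--     p = 1
--     while k > 0:
--         if k % 2 == 1:
--             acc += p
--         p *= n
--         k //= 2
--     return acc
-- ===== Notes on version B (the rewrite author's own statement) =====
-- stated objective: faster
-- what changed: B replaces A's list-building enumeration of all base-n 0/1-digit numbers up to the k-th by reading k's binary digits directly as base-n digits (Horner from the least significant bit), so no list is built at all.
import Mathlib
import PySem

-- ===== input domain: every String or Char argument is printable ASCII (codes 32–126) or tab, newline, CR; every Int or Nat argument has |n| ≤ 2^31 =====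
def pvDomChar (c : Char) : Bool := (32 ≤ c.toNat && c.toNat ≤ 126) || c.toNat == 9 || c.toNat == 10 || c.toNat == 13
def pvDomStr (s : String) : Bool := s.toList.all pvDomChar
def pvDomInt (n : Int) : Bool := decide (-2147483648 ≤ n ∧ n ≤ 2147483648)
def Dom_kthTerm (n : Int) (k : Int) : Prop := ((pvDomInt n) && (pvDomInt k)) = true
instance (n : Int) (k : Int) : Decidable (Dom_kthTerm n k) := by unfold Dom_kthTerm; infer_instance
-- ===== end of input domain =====

-- B reads k's binary digits directly as base-n digits instead of enumerating the whole
-- sequence into a list (objective: faster, O(log k) vs O(k)).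

-- ===== PORT A =====
-- inner 'for j in range(len(res)+1): … res.append(lis)' loop; 'n ** i' with i ≥ 0 is n ^ i.toNat
def kthTermInner (n : Int) (i : Int) (js : List Int) (res : List Int) : List Int :=
  match js with
  | [] => res
  | j :: rest =>
      let lis : Int := if j = 0 then n ^ i.toNat
                       else n ^ i.toNat + (PySem.List.pyGet? res (j - 1)).getD 0
      kthTermInner n i rest (res ++ [lis])

-- outer 'for i in range(k):' loop with the 'if len(res) > k: break'
def kthTermOuter (n : Int) (k : Int) (is_ : List Int) (res : List Int) : List Int :=
  match is_ with
  | [] => res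
  | i :: rest =>
      if (res.length : Int) > k then res
      else kthTermOuter n k rest
             (kthTermInner n i (PySem.List.pyRange 0 ((res.length : Int) + 1) 1) res)

def kthTerm (n : Int) (k : Int) : Int :=
  (PySem.List.pyGet? (kthTermOuter n k (PySem.List.pyRange 0 k 1) []) (k - 1)).getD 0

-- ===== PORT B =====
def kthTermAltLoop (n : Int) (k : Int) (acc : Int) (p : Int) : Int :=
  if h : 0 < k then
    kthTermAltLoop n (PySem.Int.floordiv k 2)
      (if PySem.Int.mod k 2 = 1 then acc + p else acc) (p * n)
  else acc
termination_by k.toNat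
decreasing_by
  have h2 : PySem.Int.floordiv k 2 = k / 2 := PySem.Int.floordiv_eq_ediv_of_pos (by omega)
  omega

def kthTerm_alt (n : Int) (k : Int) : Int := kthTermAltLoop n k 0 1

-- ===== PRECONDITION & SPEC =====
-- A raises IndexError (res[k-1] on a too-short or empty list) exactly when k ≤ 0.
def Pre_kthTerm (n : Int) (k : Int) : Prop := 1 ≤ k
instance (n : Int) (k : Int) : Decidable (Pre_kthTerm n k) := by unfold Pre_kthTerm; infer_instance
def pvWitness_kthTerm : Int × Int := (3, 5)

def Spec_kthTerm (n : Int) (k : Int) (out : Int) : Prop := out = kthTerm_alt n k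
instance (n : Int) (k : Int) (out : Int) : Decidable (Spec_kthTerm n k out) := by unfold Spec_kthTerm; infer_instance

-- ===== CLAIM (what is proved, stated in full; the proofs are below) =====
def Claim_equal_kthTerm : Prop := ∀ (n : Int) (k : Int), Dom_kthTerm n k → Pre_kthTerm n k → Spec_kthTerm n k (kthTerm n k)

-- ===== LEMMAS AND PROOFS =====

-- value of m's binary expansion read in base n
def pvF (n : Int) : Nat → Int
  | 0 => 0
  | m + 1 => n * pvF n ((m + 1) / 2) + (((m + 1) % 2 : Nat) : Int)
decreasing_by exact Nat.div_lt_self (Nat.succ_pos m) (by omega)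

lemma pvF_rec (n : Int) (m : Nat) : pvF n m = n * pvF n (m / 2) + ((m % 2 : Nat) : Int) := by
  cases m with
  | zero => simp [pvF]
  | succ m => rw [pvF]

lemma pvF_shift (n : Int) : ∀ (t : Nat) (j : Nat), j < 2 ^ t →
    pvF n (2 ^ t + j) = n ^ t + pvF n j := by
  intro t
  induction t with
  | zero =>
      intro j hj
      interval_cases j
      rw [pvF_rec]
      simp [pvF]
  | succ t ih =>
      intro j hj
      rw [pvF_rec]
      have hdiv : (2 ^ (t + 1) + j) / 2 = 2 ^ t + j / 2 := by
        omega
      have hmod : (2 ^ (t + 1) + j) % 2 = j % 2 := by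
        omega
      rw [hdiv, hmod, ih (j / 2) (by omega), pvF_rec n j]
      ring

-- B's loop computes acc + p * pvF
lemma altLoop_spec (n : Int) : ∀ (m : Nat) (acc p : Int),
    kthTermAltLoop n (m : Int) acc p = acc + p * pvF n m := by
  intro m
  induction m using Nat.strong_induction_on with
  | _ m ih =>
      intro acc p
      rw [kthTermAltLoop]
      by_cases hm : 0 < m
      · have h0 : (0 : Int) < (m : Int) := by exact_mod_cast hm
        rw [dif_pos h0]
        have hd : PySem.Int.floordiv (m : Int) 2 = ((m / 2 : Nat) : Int) := by
          exact_mod_cast PySem.Int.floordiv_natCast m 2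
        have hm2 : PySem.Int.mod (m : Int) 2 = ((m % 2 : Nat) : Int) := by
          exact_mod_cast PySem.Int.mod_natCast m 2
        rw [hd, hm2, ih (m / 2) (Nat.div_lt_self hm (by omega))]
        rw [pvF_rec n m]
        rcases Nat.mod_two_eq_zero_or_one m with h | h <;> simp [h] <;> ring
      · have hm0 : m = 0 := by omega
        subst hm0
        simp [pvF]

-- the sequence A enumerates: pvBins n t lists pvF n 1, …, pvF n (2^t - 1)
def pvBins (n : Int) (t : Nat) : List Int :=
  (List.range (2 ^ t - 1)).map (fun m => pvF n (m + 1))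

lemma pvBins_length (n : Int) (t : Nat) : (pvBins n t).length = 2 ^ t - 1 := by
  simp [pvBins]

lemma pvBins_get (n : Int) (t m : Nat) (h : m < 2 ^ t - 1) :
    (pvBins n t)[m]? = some (pvF n (m + 1)) := by
  simp [pvBins, List.getElem?_map, List.getElem?_range, h]

lemma pvBins_succ (n : Int) (t : Nat) :
    pvBins n (t + 1) = pvBins n t ++ (List.range (2 ^ t)).map (fun j => n ^ t + pvF n j) := by
  have hlen : 2 ^ (t + 1) - 1 = (2 ^ t - 1) + 2 ^ t := by
    have := Nat.one_le_two_pow (n := t)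
    omega
  unfold pvBins
  rw [hlen, List.range_add, List.map_append, List.map_map]
  congr 1
  apply List.map_congr_left
  intro j hj
  simp only [List.mem_range] at hj
  simp only [Function.comp]
  have h1 : 2 ^ t - 1 + j + 1 = 2 ^ t + j := by
    have := Nat.one_le_two_pow (n := t)
    omega
  rw [h1, pvF_shift n t j hj]

-- inner loop: appends the mapped values, reads untouched by the appends
lemma inner_spec (n i : Int) : ∀ (js : List Int) (res : List Int),
    (∀ j ∈ js, 0 ≤ j ∧ j ≤ (res.length : Int)) →
    kthTermInner n i js res =
      res ++ js.map (fun j => if j = 0 then n ^ i.toNat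
                              else n ^ i.toNat + (PySem.List.pyGet? res (j - 1)).getD 0) := by
  intro js
  induction js with
  | nil => intro res _; simp [kthTermInner]
  | cons j rest ih =>
      intro res hb
      rw [kthTermInner]
      obtain ⟨hj0, hjl⟩ := hb j (by simp)
      set v : Int := if j = 0 then n ^ i.toNat
                     else n ^ i.toNat + (PySem.List.pyGet? res (j - 1)).getD 0 with hv
      rw [ih (res ++ [v]) ?_]
      · rw [List.append_assoc]
        congr 1
        simp only [List.cons_append, List.nil_append, List.map_cons]
        congr 1
        apply List.map_congr_left
        intro j' hj'
        obtain ⟨hj'0, hj'l⟩ := hb j' (by simp [hj'])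
        by_cases h0 : j' = 0
        · simp [h0]
        · have hlt : j' - 1 < (res.length : Int) := by omega
          have hge : 0 ≤ j' - 1 := by omega
          rw [if_neg h0, if_neg h0]
          have : PySem.List.pyGet? (res ++ [v]) (j' - 1) = PySem.List.pyGet? res (j' - 1) := by
            rw [PySem.List.pyGet?_of_nonneg (res ++ [v]) hge,
                PySem.List.pyGet?_of_nonneg res hge]
            rw [List.getElem?_append_left]
            omega
          rw [this]
      · intro j' hj'
        obtain ⟨h1, h2⟩ := hb j' (by simp [hj'])
        constructor
        · exact h1
        · simp only [List.length_append, List.length_cons, List.length_nil]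
          push_cast
          omega

-- one outer step starting from pvBins n t produces pvBins n (t+1)
lemma inner_step (n : Int) (t : Nat) :
    kthTermInner n (t : Int) (PySem.List.pyRange 0 (((pvBins n t).length : Int) + 1) 1) (pvBins n t)
      = pvBins n (t + 1) := by
  have h2 := Nat.one_le_two_pow (n := t)
  have hL : ((pvBins n t).length : Int) + 1 = ((2 ^ t : Nat) : Int) := by
    have hnat : (2 ^ t - 1) + 1 = 2 ^ t := by omega
    rw [pvBins_length]
    exact_mod_cast hnat
  rw [hL, PySem.List.pyRange_zero_natCast]
  rw [inner_spec]
  · rw [pvBins_succ, List.map_map]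
    congr 1
    apply List.map_congr_left
    intro m hm
    simp only [List.mem_range] at hm
    simp only [Function.comp]
    by_cases h0 : m = 0
    · subst h0
      simp [pvF, Int.toNat_natCast]
    · have hne : ((m : Int)) ≠ 0 := by exact_mod_cast h0
      rw [if_neg hne]
      have hm1 : (m : Int) - 1 = ((m - 1 : Nat) : Int) := by omega
      rw [hm1, PySem.List.pyGet?_natCast, pvBins_get n t (m - 1) (by omega)]
      have : m - 1 + 1 = m := by omega
      simp [this, Int.toNat_natCast]
  · intro j hj
    rw [List.mem_map] at hj
    obtain ⟨m, hm, rfl⟩ := hj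
    simp only [List.mem_range] at hm
    rw [pvBins_length]
    constructor
    · exact Int.natCast_nonneg m
    · have hm' : m ≤ 2 ^ t - 1 := by omega
      exact_mod_cast hm'

-- the outer loop, run from state pvBins n t, ends in some pvBins n s with 2^s - 1 ≥ k
lemma outer_done (n k : Int) (hk : 1 ≤ k) (t : Nat) (heq : (t : Int) = k) :
    ∃ s : Nat, kthTermOuter n k (PySem.List.pyRange (t : Int) k 1) (pvBins n t) = pvBins n s
      ∧ k ≤ ((2 ^ s - 1 : Nat) : Int) := by
  refine ⟨t, ?_, ?_⟩
  · rw [heq, PySem.List.pyRange_one_eq_nil le_rfl, kthTermOuter]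
  · have ht1 : t < 2 ^ t := Nat.lt_two_pow_self
    have h2 : t ≤ 2 ^ t - 1 := by omega
    rw [← heq]
    exact_mod_cast h2

lemma outer_spec (n k : Int) (hk : 1 ≤ k) : ∀ (fuel t : Nat), k ≤ (t : Int) + fuel → (t : Int) ≤ k →
    ∃ s : Nat, kthTermOuter n k (PySem.List.pyRange (t : Int) k 1) (pvBins n t) = pvBins n s
      ∧ k ≤ ((2 ^ s - 1 : Nat) : Int) := by
  intro fuel
  induction fuel with
  | zero =>
      intro t hf ht
      exact outer_done n k hk t (by push_cast at hf; omega)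
  | succ fuel ih =>
      intro t hf ht
      by_cases heq : (t : Int) = k
      · exact outer_done n k hk t heq
      · have hlt : (t : Int) < k := lt_of_le_of_ne ht heq
        rw [PySem.List.pyRange_one_cons hlt, kthTermOuter]
        by_cases hbrk : ((pvBins n t).length : Int) > k
        · exact ⟨t, by rw [if_pos hbrk], by rw [pvBins_length] at hbrk; exact le_of_lt hbrk⟩
        · rw [if_neg hbrk, inner_step]
          have h1 : ((t : Int)) + 1 = ((t + 1 : Nat) : Int) := by push_cast; ring
          rw [h1]
          exact ih (t + 1) (by push_cast; push_cast at hf; omega) (by push_cast; omega)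

-- ===== VERDICT (by name: the statement is the Claim_ definition above) =====
theorem kthTerm_spec : Claim_equal_kthTerm := by
  intro n k _ hk
  unfold Pre_kthTerm at hk
  have hk0 : (k.toNat : Int) = k := Int.toNat_of_nonneg (by omega)
  have hk1 : 1 ≤ k.toNat := by omega
  unfold Spec_kthTerm kthTerm kthTerm_alt
  have hB : kthTermAltLoop n k 0 1 = pvF n k.toNat := by
    conv_lhs => rw [← hk0]
    rw [altLoop_spec]; ring
  rw [hB]
  have h0 : pvBins n 0 = [] := by simp [pvBins]
  obtain ⟨s, hs, hks⟩ := outer_spec n k hk k.toNat 0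
    (by push_cast; omega) (by push_cast; omega)
  rw [show ((0 : Nat) : Int) = 0 from rfl, h0] at hs
  rw [hs]
  have hk' : k.toNat ≤ 2 ^ s - 1 := by
    rw [← hk0] at hks
    exact_mod_cast hks
  have hi : k - 1 = ((k.toNat - 1 : Nat) : Int) := by omega
  rw [hi, PySem.List.pyGet?_natCast, pvBins_get n s (k.toNat - 1) (by omega)]
  have : k.toNat - 1 + 1 = k.toNat := by omega
  rw [this]
  rfl
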